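-- pv_equiv track=rewrite | github.com/widehyo1/playground | 2024/12/22/make_heap.py | add_to_head
-- ===== SOURCE A (Python) =====
-- from typing import List
--
-- def add_to_head(heap: List[int], target: int):
--     n = len(heap)
--     if n == 0:
--         heap.append(target)
--         return heap
--     heap.append(target)
--     target_idx = n
--     while target_idx != 0:
--         # target index is updated iff swap occurs
--         # 1. find parent_idx
--         # 2. determine swap or not
--         # 3. if swap, update target_idx
--         parent_idx = (target_idx - 1) // 2
--         if target <= heap[parent_idx]:
--             # swap condition
--             heap[target_idx], heap[parent_idx] = heap[parent_idx], heap[target_idx]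
--             target_idx = parent_idx
--         else:
--             break
--     return heap
-- ===== SOURCE B (Python) =====
-- def add_to_head(heap, target):
--     heap.append(target)
--     # ancestor path of the new slot, bottom-up
--     path = []
--     i = len(heap) - 1
--     while i > 0:
--         i = (i - 1) // 2
--         path.append(i)
--     # how many ancestors does target displace?
--     k = 0
--     for p in path:
--         if target <= heap[p]:
--             k += 1
--         else:
--             break
--     # shift those k ancestors one level down along the path, then place target
--     dest = len(heap) - 1
--     for p in path[:k]:
--         heap[dest] = heap[p]
--         dest = p
--     heap[dest] = target
--     return heap
-- ===== Notes on version B (the rewrite author's own statement) =====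
-- stated objective: alternative
-- what changed: Replaces the swap-per-step in-place sift-up with a read-only pass (precompute the ancestor path and count how many ancestors the new key displaces) followed by one shift-down pass that writes target exactly once (hole-based, heapq._siftdown style).
import Mathlib
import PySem

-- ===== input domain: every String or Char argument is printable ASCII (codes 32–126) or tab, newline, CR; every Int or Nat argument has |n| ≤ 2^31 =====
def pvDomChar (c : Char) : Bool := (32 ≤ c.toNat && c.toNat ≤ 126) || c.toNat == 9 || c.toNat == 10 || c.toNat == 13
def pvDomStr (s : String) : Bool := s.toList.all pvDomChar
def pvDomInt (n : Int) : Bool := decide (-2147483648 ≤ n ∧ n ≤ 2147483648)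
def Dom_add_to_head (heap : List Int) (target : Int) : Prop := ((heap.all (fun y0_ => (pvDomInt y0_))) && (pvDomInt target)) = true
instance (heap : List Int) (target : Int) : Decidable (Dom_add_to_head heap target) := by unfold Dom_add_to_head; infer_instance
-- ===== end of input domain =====

-- B replaces A's swap-per-step sift-up with a read-only ancestor-path/count pass plus one
-- shift-down pass that places target once (alternative decomposition, same cost).
-- Both Pythons mutate the argument list in place identically; the theorems are about the return value.

-- ===== PORT A =====
-- A's while loop; indices are always nonnegative, so tracked as Nat ((target_idx-1)//2 = (i-1)/2 on Nat).
-- The simultaneous swap reads both cells from the pre-swap list, exactly as Python does.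
def aSiftLoop (heap : List Int) (target : Int) (i : Nat) : List Int :=
  if h : i = 0 then heap
  else
    -- parent_idx = (i - 1) / 2
    if target ≤ heap.getD ((i - 1) / 2) 0 then
      aSiftLoop ((heap.set i (heap.getD ((i - 1) / 2) 0)).set ((i - 1) / 2) (heap.getD i 0))
        target ((i - 1) / 2)
    else heap
termination_by i
decreasing_by omega

def add_to_head (heap : List Int) (target : Int) : List Int :=
  if heap.length = 0 then heap ++ [target]
  else aSiftLoop (heap ++ [target]) target heap.length

-- ===== PORT B =====
-- first while loop of Source B: ancestor path of index i, bottom-up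
def bPath (i : Nat) : List Nat :=
  if h : i = 0 then [] else ((i - 1) / 2) :: bPath ((i - 1) / 2)
termination_by i
decreasing_by omega

-- counting for loop of Source B (with break)
def bCount (heap : List Int) (target : Int) : List Nat → Nat
  | [] => 0
  | p :: rest => if target ≤ heap.getD p 0 then 1 + bCount heap target rest else 0

-- shifting for loop of Source B, carrying the state (heap, dest)
def bShift (ps : List Nat) (heap : List Int) (dest : Nat) : List Int × Nat :=
  match ps with
  | [] => (heap, dest)
  | p :: rest => bShift rest (heap.set dest (heap.getD p 0)) p

def add_to_head_alt (heap : List Int) (target : Int) : List Int :=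
  let h := heap ++ [target]
  let path := bPath (h.length - 1)
  let k := bCount h target path
  let r := bShift (path.take k) h (h.length - 1)
  r.1.set r.2 target

-- ===== PRECONDITION & SPEC =====
def Spec_add_to_head (heap : List Int) (target : Int) (out : List Int) : Prop := out = add_to_head_alt heap target
instance (heap : List Int) (target : Int) (out : List Int) : Decidable (Spec_add_to_head heap target out) := by unfold Spec_add_to_head; infer_instance

-- ===== CLAIM (what is proved, stated in full; the proofs are below) =====
def Claim_equal_add_to_head : Prop := ∀ (heap : List Int) (target : Int), Dom_add_to_head heap target → Spec_add_to_head heap target (add_to_head heap target)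

-- ===== LEMMAS AND PROOFS =====

-- B's tail: run the shift loop, then place target at the final hole
def bPlace (ps : List Nat) (heap : List Int) (dest : Nat) (target : Int) : List Int :=
  (bShift ps heap dest).1.set (bShift ps heap dest).2 target

lemma bPlace_cons (p : Nat) (rest : List Nat) (heap : List Int) (d : Nat) (t : Int) :
    bPlace (p :: rest) heap d t = bPlace rest (heap.set d (heap.getD p 0)) p t := rfl

lemma getD_set_self (l : List Int) (d : Nat) (v : Int) (h : d < l.length) :
    (l.set d v).getD d 0 = v := by
  simp [List.getD_eq_getElem?_getD, List.getElem?_set_self h]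

lemma getD_set_ne (l : List Int) (d j : Nat) (v : Int) (h : d ≠ j) :
    (l.set d v).getD j 0 = l.getD j 0 := by
  simp [List.getD_eq_getElem?_getD, List.getElem?_set_ne h]

lemma eq_of_getD (h₁ h₂ : List Int) (hl : h₁.length = h₂.length)
    (hg : ∀ j, h₁.getD j 0 = h₂.getD j 0) : h₁ = h₂ := by
  apply List.ext_getElem hl
  intro j hj₁ hj₂
  have := hg j
  simp only [List.getD_eq_getElem?_getD, List.getElem?_eq_getElem hj₁,
    List.getElem?_eq_getElem hj₂, Option.getD_some] at this
  exact this

-- writing back the value a cell already holds changes nothing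
lemma set_invariant (heap : List Int) (i : Nat) (target : Int) (hlen : i < heap.length)
    (hinv : heap.getD i 0 = target) : heap.set i target = heap := by
  apply eq_of_getD
  · simp
  · intro j
    by_cases hj : j = i
    · subst hj; rw [getD_set_self heap j target hlen, hinv]
    · exact getD_set_ne heap i j target (fun e => hj e.symm)

lemma mem_bPath_lt (i q : Nat) (h : q ∈ bPath i) : q < i := by
  induction i using Nat.strong_induction_on with
  | _ i ih =>
    rw [bPath] at h
    split at h
    · simp at h
    · rename_i hi
      rcases List.mem_cons.1 h with h1 | h1
      · omega
      · have := ih ((i - 1) / 2) (by omega) h1; omega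

lemma bCount_congr (target : Int) (ps : List Nat) (h₁ h₂ : List Int)
    (hg : ∀ q ∈ ps, h₁.getD q 0 = h₂.getD q 0) :
    bCount h₁ target ps = bCount h₂ target ps := by
  induction ps with
  | nil => rfl
  | cons p rest ih =>
    simp only [bCount, hg p (by simp)]
    rw [ih (fun q hq => hg q (List.mem_cons_of_mem _ hq))]

-- the hole cell's old content is never read: its value does not matter
lemma bPlace_set_dest (ps : List Nat) (h : List Int) (d : Nat) (t' target : Int)
    (hps : ∀ q ∈ ps, q ≠ d) :
    bPlace ps (h.set d t') d target = bPlace ps h d target := by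
  cases ps with
  | nil => simp [bPlace, bShift, List.set_set]
  | cons p rest =>
    have hpd : p ≠ d := hps p (by simp)
    rw [bPlace_cons, bPlace_cons, getD_set_ne h d p t' (Ne.symm hpd), List.set_set]

-- main loop correspondence: under the invariant heap[i] = target, A's swap loop equals
-- B's count-then-shift placement along the ancestor path
lemma aSiftLoop_eq (target : Int) :
    ∀ i heap, i < heap.length → heap.getD i 0 = target →
    aSiftLoop heap target i =
      bPlace ((bPath i).take (bCount heap target (bPath i))) heap i target := by
  intro i
  induction i using Nat.strong_induction_on with
  | _ i ih =>
    intro heap hlen hinv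
    by_cases hi : i = 0
    · subst hi
      rw [aSiftLoop, bPath]
      simp only [bPlace]
      exact (set_invariant heap 0 target hlen hinv).symm
    · rw [aSiftLoop, bPath]
      simp only [dif_neg hi]
      have hpi : (i - 1) / 2 < i := by omega
      have hplen : (i - 1) / 2 < heap.length := lt_trans hpi hlen
      by_cases hc : target ≤ heap.getD ((i - 1) / 2) 0
      · rw [if_pos hc]
        set p := (i - 1) / 2 with hp
        set heap' := (heap.set i (heap.getD p 0)).set p (heap.getD i 0) with hh
        have hlen' : heap'.length = heap.length := by simp [hh]
        have hinv' : heap'.getD p 0 = target := by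
          rw [hh, getD_set_self _ p _ (by simp [hplen]), hinv]
        have hih := ih p hpi heap' (by rw [hlen']; exact hplen) hinv'
        have hagree : ∀ q ∈ bPath p, heap'.getD q 0 = heap.getD q 0 := by
          intro q hq
          have hqp : q < p := mem_bPath_lt p q hq
          rw [hh, getD_set_ne _ p q _ (by omega), getD_set_ne _ i q _ (by omega)]
        have hcount : bCount heap' target (bPath p) = bCount heap target (bPath p) :=
          bCount_congr target (bPath p) heap' heap hagree
        rw [hih, hcount]
        rw [show bCount heap target (p :: bPath p) = 1 + bCount heap target (bPath p) from by
          simp only [bCount]; rw [if_pos hc]]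
        rw [show (p :: bPath p).take (1 + bCount heap target (bPath p))
              = p :: (bPath p).take (bCount heap target (bPath p)) from by
          rw [Nat.add_comm]; exact List.take_succ_cons]
        rw [bPlace_cons]
        rw [hinv] at hh
        rw [hh]
        exact bPlace_set_dest _ _ p target target
          (fun q hq => Nat.ne_of_lt (mem_bPath_lt p q (List.mem_of_mem_take hq)))
      · rw [if_neg hc]
        rw [show bCount heap target (((i - 1) / 2) :: bPath ((i - 1) / 2)) = 0 from by
          simp only [bCount]; rw [if_neg hc]]
        simp only [List.take_zero, bPlace, bShift]
        exact (set_invariant heap i target hlen hinv).symm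

-- ===== VERDICT (by name: the statement is the Claim_ definition above) =====
theorem add_to_head_spec : Claim_equal_add_to_head := by
  intro heap target _
  unfold Spec_add_to_head
  have hlt : heap.length < (heap ++ [target]).length := by simp
  have hinv : (heap ++ [target]).getD heap.length 0 = target := by
    rw [List.getD_eq_getElem?_getD, List.getElem?_concat_length]; rfl
  have key := aSiftLoop_eq target heap.length (heap ++ [target]) hlt hinv
  by_cases h0 : heap.length = 0
  · have hnil : heap = [] := List.eq_nil_of_length_eq_zero h0
    subst hnil
    simp [add_to_head, add_to_head_alt, bPath, bCount, bShift]
  · simp only [add_to_head, add_to_head_alt, if_neg h0]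
    have hlen1 : (heap ++ [target]).length - 1 = heap.length := by simp
    rw [hlen1]
    simpa [bPlace] using key
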